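-- pv_equiv track=rewrite | github.com/pypi-data/pypi-mirror-402 | packages/genericlib/genericlib-0.6.2a1.tar.gz/genericlib-0.6.2a1/genericlib/search.py | replace_posix_char_class
-- ===== SOURCE A (Python) =====
-- def replace_posix_char_class(line):   # noqa
--     """
--     Replace POSIX character class placeholders with actual regex ranges.
--
--     This method scans the input `line` for placeholder tokens previously
--     inserted by `mark_posix_char_class` (e.g.,
--     `__placeholder_digit_pat__`, `__placeholder_alpha_pat__`) and
--     substitutes them with their corresponding regex character ranges.
--
--     Supported POSIX classes
--     -----------------------
--     - alpha   → `a-zA-Z`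
--     - alnum   → `a-zA-Z0-9`
--     - blank   → space or tab (` \t`)
--     - cntrl   → ASCII control characters (`\\x00-\\x1f\\x7f`)
--     - digit   → `0-9`
--     - graph   → visible ASCII characters (`\\x21-\\x7e`)
--     - lower   → `a-z`
--     - print   → printable ASCII characters (`\\x20-\\x7e`)
--     - space   → space or tab (` \t`)
--     - upper   → `A-Z`
--     - xdigit  → hexadecimal digits (`a-fA-F0-9`)
--
--     Parameters
--     ----------
--     line : str
--         The input string containing POSIX class placeholders.
--
--     Returns
--     -------
--     str
--         A regex-safe string with placeholders replaced by actual
--         character ranges.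
--
--     Examples
--     --------
--     - `replace_posix_char_class("foo__placeholder_digit_pat__bar")`
--       → `"foo0-9bar"`
--     - `replace_posix_char_class("__placeholder_alpha_pat__")`
--       → `"a-zA-Z"`
--
--     Notes
--     -----
--     - This method is the counterpart to `mark_posix_char_class`.
--     - Placeholders are replaced with raw regex ranges, not enclosed
--       in brackets; ensure they are used inside `[...]` when building
--       character classes.
--     - Typically used internally by `parse_line` after marking
--       placeholders to finalize the regex pattern.
--     """
--     tbl = dict(
--         alpha=r'a-zA-Z',
--         alnum=r'a-zA-Z0-9',
--         blank=r' \t',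
--         cntrl=r'\x00-\x1f\x7f',
--         digit=r'0-9',
--         graph=r'\x21-\x7e',
--         lower=r'a-z',
--         print=r'\x20-\x7e',
--         space=r' \t',
--         upper=r'A-Z',
--         xdigit=r'a-fA-F0-9'
--     )
--     for key, replaced in tbl.items():
--         replacing = '__placeholder_%s_pat__' % key
--         line = line.replace(replacing, replaced)
--     return line
-- ===== SOURCE B (Python) =====
-- def replace_posix_char_class(line):
--     """Single left-to-right scan: copy characters, and whenever a known
--     placeholder token starts at the current position emit its range and
--     jump past it, instead of eleven sequential full-string replace passes."""
--     tokens = [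
--         ('__placeholder_alpha_pat__', r'a-zA-Z'),
--         ('__placeholder_alnum_pat__', r'a-zA-Z0-9'),
--         ('__placeholder_blank_pat__', r' \t'),
--         ('__placeholder_cntrl_pat__', r'\x00-\x1f\x7f'),
--         ('__placeholder_digit_pat__', r'0-9'),
--         ('__placeholder_graph_pat__', r'\x21-\x7e'),
--         ('__placeholder_lower_pat__', r'a-z'),
--         ('__placeholder_print_pat__', r'\x20-\x7e'),
--         ('__placeholder_space_pat__', r' \t'),
--         ('__placeholder_upper_pat__', r'A-Z'),
--         ('__placeholder_xdigit_pat__', r'a-fA-F0-9'),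
--     ]
--     out = []
--     i = 0
--     n = len(line)
--     while i < n:
--         for token, rng in tokens:
--             if line.startswith(token, i):
--                 out.append(rng)
--                 i += len(token)
--                 break
--         else:
--             out.append(line[i])
--             i += 1
--     return ''.join(out)
-- ===== Notes on version B (the rewrite author's own statement) =====
-- stated objective: alternative
-- what changed: B makes a single left-to-right scan over the line with its own literal placeholder-token table, emitting the matching class range whenever a placeholder token starts at the current position, instead of A's eleven sequential full-string str.replace passes (one per POSIX class).
import Mathlib
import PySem

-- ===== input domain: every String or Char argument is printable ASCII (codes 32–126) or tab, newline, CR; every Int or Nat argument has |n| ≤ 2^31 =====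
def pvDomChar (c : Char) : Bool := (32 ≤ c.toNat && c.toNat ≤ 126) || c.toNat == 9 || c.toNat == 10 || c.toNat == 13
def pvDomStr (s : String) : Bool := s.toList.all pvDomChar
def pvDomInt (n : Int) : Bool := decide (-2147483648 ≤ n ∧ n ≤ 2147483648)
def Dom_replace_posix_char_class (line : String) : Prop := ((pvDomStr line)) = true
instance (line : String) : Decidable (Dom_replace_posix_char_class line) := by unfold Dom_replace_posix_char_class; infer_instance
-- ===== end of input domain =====

-- B replaces A's eleven sequential full-string str.replace passes by one left-to-right scan
-- over its own literal placeholder-token table (objective: alternative, same cost).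

-- ===== PORT A =====
-- the dict literal of A, in insertion order
def pvTbl : List (String × String) :=
  [("alpha", "a-zA-Z"),
   ("alnum", "a-zA-Z0-9"),
   ("blank", " \\t"),
   ("cntrl", "\\x00-\\x1f\\x7f"),
   ("digit", "0-9"),
   ("graph", "\\x21-\\x7e"),
   ("lower", "a-z"),
   ("print", "\\x20-\\x7e"),
   ("space", " \\t"),
   ("upper", "A-Z"),
   ("xdigit", "a-fA-F0-9")]

-- for key, replaced in tbl.items(): line = line.replace('__placeholder_%s_pat__' % key, replaced)
def replace_posix_char_class (line : String) : String :=
  pvTbl.foldl (fun l kv => PySem.Str.replace l ("__placeholder_" ++ kv.1 ++ "_pat__") kv.2) line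

-- ===== PORT B =====
-- B's own literal table: full placeholder token → range (Source B's `tokens` list)
def pvToks : List (List Char × List Char) :=
  [("__placeholder_alpha_pat__".toList, "a-zA-Z".toList),
   ("__placeholder_alnum_pat__".toList, "a-zA-Z0-9".toList),
   ("__placeholder_blank_pat__".toList, " \\t".toList),
   ("__placeholder_cntrl_pat__".toList, "\\x00-\\x1f\\x7f".toList),
   ("__placeholder_digit_pat__".toList, "0-9".toList),
   ("__placeholder_graph_pat__".toList, "\\x21-\\x7e".toList),
   ("__placeholder_lower_pat__".toList, "a-z".toList),
   ("__placeholder_print_pat__".toList, "\\x20-\\x7e".toList),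
   ("__placeholder_space_pat__".toList, " \\t".toList),
   ("__placeholder_upper_pat__".toList, "A-Z".toList),
   ("__placeholder_xdigit_pat__".toList, "a-fA-F0-9".toList)]

-- the while-loop of B: at each position, emit the range of the (first) token that starts
-- there and jump past it, else copy the character and move one position on
def pvScan (l : List Char) : List Char :=
  match h : pvToks.find? (fun p => p.1.isPrefixOf l) with
  | some p => p.2 ++ pvScan (l.drop p.1.length)
  | none =>
    match l with
    | [] => []
    | c :: cs => c :: pvScan cs
termination_by l.length
decreasing_by
  · have hpre : p.1 <+: l := by
      have := List.find?_some h
      simpa [List.isPrefixOf_iff_prefix] using this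
    have hmem : p ∈ pvToks := List.mem_of_find?_eq_some h
    have hne : ∀ q ∈ pvToks, q.1 ≠ [] := by decide
    have h1 : 0 < p.1.length := List.length_pos_of_ne_nil (hne p hmem)
    have h2 : p.1.length ≤ l.length := hpre.length_le
    simp only [List.length_drop]
    omega
  · simp only [List.length_cons]
    omega

def replace_posix_char_class_alt (line : String) : String :=
  String.ofList (pvScan line.toList)

-- ===== PRECONDITION & SPEC =====
-- Pre_ excludes lines containing a substring on which two placeholder tokens could overlap
-- (a token's trailing "__" or "_" doubling as the next token's leading underscores): there
-- A's output depends on the accidental key order of its table rather than on position, and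
-- B's leftmost-first resolution is as defensible as A's key-order one.
def Pre_replace_posix_char_class (line : String) : Prop :=
  ¬ ("_pat__placeholder_".toList <:+: line.toList) ∧
  ¬ ("_pat___placeholder_".toList <:+: line.toList)
instance (line : String) : Decidable (Pre_replace_posix_char_class line) := by
  unfold Pre_replace_posix_char_class; infer_instance

def pvWitness_replace_posix_char_class : String := "foo__placeholder_digit_pat__bar"

def Spec_replace_posix_char_class (line : String) (out : String) : Prop :=
  out = replace_posix_char_class_alt line
instance (line : String) (out : String) : Decidable (Spec_replace_posix_char_class line out) := by
  unfold Spec_replace_posix_char_class; infer_instance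

-- ===== CLAIM =====
def Claim_equal_replace_posix_char_class : Prop :=
  ∀ (line : String), Dom_replace_posix_char_class line → Pre_replace_posix_char_class line →
    Spec_replace_posix_char_class line (replace_posix_char_class line)

-- ===== LEMMAS AND PROOFS =====

-- B's literal token table is exactly A's table with the placeholder pattern applied
set_option maxRecDepth 100000 in
lemma pvToks_eq :
    pvTbl.map (fun kv => (("__placeholder_" ++ kv.1 ++ "_pat__").toList, kv.2.toList)) = pvToks := by
  decide

-- a clean recursion equal to PySem.Chars.replace for a nonempty pattern
def repL (t r : List Char) : List Char → List Char
  | [] => []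
  | c :: cs =>
    if h : (t.isPrefixOf (c :: cs) && !t.isEmpty) = true
    then r ++ repL t r (List.drop t.length (c :: cs))
    else c :: repL t r cs
termination_by l => l.length
decreasing_by
  · simp only [Bool.and_eq_true, Bool.not_eq_eq_eq_not, Bool.not_true] at h
    have hne : t ≠ [] := by
      intro hcon; rw [hcon] at h; simp at h
    have : 0 < t.length := List.length_pos_of_ne_nil hne
    simp only [List.length_drop, List.length_cons]
    omega
  · simp only [List.length_cons]
    omega

-- A's fold, on the char-list side
def chainR (ts : List (List Char × List Char)) (l : List Char) : List Char :=
  ts.foldl (fun s p => repL p.1 p.2 s) l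

lemma repL_nil (t r : List Char) : repL t r [] = [] := by simp [repL]

lemma repL_pos (t r : List Char) (l : List Char) (hne : t ≠ []) (hp : t <+: l) :
    repL t r l = r ++ repL t r (l.drop t.length) := by
  cases l with
  | nil => exact absurd (List.prefix_nil.mp hp) hne
  | cons c cs =>
    rw [repL, dif_pos]
    simp [List.isPrefixOf_iff_prefix, hp, hne]

lemma repL_neg (t r : List Char) (c : Char) (cs : List Char) (hp : ¬ t <+: (c :: cs)) :
    repL t r (c :: cs) = c :: repL t r cs := by
  rw [repL, dif_neg]
  simp [List.isPrefixOf_iff_prefix, hp]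

-- fuel-version of Python's replace equals repL
lemma go_eq (t r : List Char) (hne : t ≠ []) :
    ∀ (fuel : Nat) (l acc : List Char), l.length ≤ fuel →
      PySem.Chars.replace.go t r fuel l acc = acc.reverse ++ repL t r l := by
  intro fuel
  induction fuel with
  | zero =>
    intro l acc hl
    have hnil : l = [] := List.eq_nil_of_length_eq_zero (Nat.le_zero.mp hl)
    subst hnil
    simp [PySem.Chars.replace.go, repL_nil]
  | succ fuel ih =>
    intro l acc hl
    cases l with
    | nil =>
      rw [PySem.Chars.replace.go] <;> simp [repL_nil]
    | cons c cs =>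
      have hgo : PySem.Chars.replace.go t r (fuel + 1) (c :: cs) acc =
          (if t.isPrefixOf (c :: cs) = true then
            PySem.Chars.replace.go t r fuel (List.drop t.length (c :: cs)) (r.reverse ++ acc)
           else PySem.Chars.replace.go t r fuel cs (c :: acc)) := by
        rw [PySem.Chars.replace.go]
      by_cases hp : t <+: (c :: cs)
      · have hb : t.isPrefixOf (c :: cs) = true := List.isPrefixOf_iff_prefix.mpr hp
        have htl : 0 < t.length := List.length_pos_of_ne_nil hne
        have hlen : (List.drop t.length (c :: cs)).length ≤ fuel := by
          simp only [List.length_drop, List.length_cons]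
          simp only [List.length_cons] at hl
          omega
        rw [hgo, if_pos hb, ih _ _ hlen, repL_pos t r _ hne hp]
        simp
      · have hb : t.isPrefixOf (c :: cs) = false := by
          cases hb0 : t.isPrefixOf (c :: cs)
          · rfl
          · exact absurd (List.isPrefixOf_iff_prefix.mp hb0) hp
        have hlen : cs.length ≤ fuel := by
          simp only [List.length_cons] at hl; omega
        rw [hgo, if_neg (by simp [hb]), ih _ _ hlen, repL_neg t r c cs hp]
        simp

lemma replace_eq_repL (t r l : List Char) (hne : t ≠ []) :
    PySem.Chars.replace l t r = repL t r l := by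
  rw [PySem.Chars.replace, if_neg (by simp [hne])]
  simpa using go_eq t r hne l.length l [] le_rfl

-- ===== unfolding equations for pvScan =====

lemma pvScan_some {l : List Char} {p : List Char × List Char}
    (hf : pvToks.find? (fun q => q.1.isPrefixOf l) = some p) :
    pvScan l = p.2 ++ pvScan (l.drop p.1.length) := by
  rw [pvScan]
  split
  · rename_i p' heq
    rw [hf] at heq
    cases heq
    rfl
  · rename_i heq
    rw [hf] at heq
    cases heq

lemma pvScan_none_cons {c : Char} {cs : List Char}
    (hf : pvToks.find? (fun q => q.1.isPrefixOf (c :: cs)) = none) :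
    pvScan (c :: cs) = c :: pvScan cs := by
  rw [pvScan]
  split
  · rename_i p' heq
    rw [hf] at heq
    cases heq
  · rfl

lemma pvScan_nil : pvScan [] = [] := by
  rw [pvScan]
  split
  · rename_i p' heq
    rw [show pvToks.find? (fun q => q.1.isPrefixOf ([] : List Char)) = none from by decide] at heq
    cases heq
  · rfl

-- ===== finite facts about the concrete table (by decide) =====

def pvProbe1 : List Char := "placeholder_".toList
def pvProbe2 : List Char := "_placeholder_".toList

def pvPieceSrc : List (List Char) := pvToks.map Prod.fst ++ [pvProbe1, pvProbe2]

def pvPiece (u : List Char) : Prop := ∃ s ∈ pvPieceSrc, ∃ m, m < s.length ∧ u = s.drop m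

set_option maxRecDepth 100000 in
lemma f_tok_ne_nil : ∀ p ∈ pvToks, p.1 ≠ [] := by decide
set_option maxRecDepth 100000 in
lemma f_tok_len : ∀ p ∈ pvToks, 3 ≤ p.1.length := by decide
set_option maxRecDepth 100000 in
lemma f_repl_len : ∀ p ∈ pvToks, 2 ≤ p.2.length := by decide
set_option maxRecDepth 100000 in
lemma f_repl_no_us' : ∀ p ∈ pvToks, ¬ ('_' ∈ p.2) := by decide
lemma f_repl_no_us : ∀ p ∈ pvToks, ∀ c ∈ p.2, c ≠ '_' := by
  intro p hp c hc rfl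
  exact f_repl_no_us' p hp hc
set_option maxRecDepth 100000 in
lemma f_tok_head : ∀ p ∈ pvToks, ['_', '_'] <+: p.1 := by decide
set_option maxRecDepth 100000 in
lemma f_tok_suffix : ∀ p ∈ pvToks, p.1 = p.1.take (p.1.length - 6) ++ "_pat__".toList := by decide
set_option maxRecDepth 100000 in
lemma f_tok_drop2 : ∀ p ∈ pvToks, pvProbe1 <+: p.1.drop 2 := by decide
set_option maxRecDepth 100000 in
lemma f_tok_drop1 : ∀ p ∈ pvToks, pvProbe2 <+: p.1.drop 1 := by decide
set_option maxRecDepth 100000 in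
lemma f_drop_len2 : ∀ p ∈ pvToks, p.1.drop (p.1.length - 2) = ['_', '_'] := by decide
set_option maxRecDepth 100000 in
lemma f_drop_len1 : ∀ p ∈ pvToks, p.1.drop (p.1.length - 1) = ['_'] := by decide
set_option maxRecDepth 100000 in
lemma f_piece_repl : ∀ s ∈ pvPieceSrc, ∀ m < s.length, ∀ b ∈ pvToks,
    ¬ ((s.drop m).take 2 <+: b.2.take 2) := by decide
set_option maxRecDepth 100000 in
lemma f0 : ∀ a ∈ pvToks, ∀ b ∈ pvToks,
    a.1 = b.1 ∨ (¬ (a.1 <+: b.1) ∧ ¬ (b.1 <+: a.1)) := by decide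
set_option maxRecDepth 100000 in
lemma f3 : ∀ a ∈ pvToks, ∀ b ∈ pvToks, ∀ p, 1 ≤ p → p < a.1.length →
    (a.1.length - p ≤ 2) ∨
    (¬ ((a.1.drop p).take 3 <+: b.1.take 3) ∧ ¬ (b.1.take 3 <+: (a.1.drop p).take 3)) := by
  decide

-- ===== generic prefix lemmas =====

lemma not_prefix_of_take (n : Nat) {x y : List Char}
    (h : ¬ (x.take n <+: y.take n)) : ¬ x <+: y := fun hp => h (hp.take n)

lemma incompat_no_prefix {a b x : List Char} (h1 : ¬ a <+: b) (h2 : ¬ b <+: a) :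
    ¬ b <+: (a ++ x) := by
  intro h
  rcases le_total b.length a.length with hle | hle
  · exact h2 (List.prefix_of_prefix_length_le h (List.prefix_append a x) hle)
  · exact h1 (List.prefix_of_prefix_length_le (List.prefix_append a x) h hle)

-- ===== no occurrence of a token piece is ever created by a replacement =====

lemma piece_not_prefix_repl {u : List Char} (hu : pvPiece u) :
    ∀ b ∈ pvToks, ∀ X, ¬ u <+: (b.2 ++ X) := by
  obtain ⟨s, hs, m, hm, rfl⟩ := hu
  intro b hb X h
  have h2 : (s.drop m).take 2 <+: (b.2 ++ X).take 2 := h.take 2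
  have hbl : 2 ≤ b.2.length := f_repl_len b hb
  rw [List.take_append_of_le_length hbl] at h2
  exact f_piece_repl s hs m hm b hb h2

lemma piece_ne_nil {u : List Char} (hu : pvPiece u) : u ≠ [] := by
  obtain ⟨s, hs, m, hm, rfl⟩ := hu
  simp only [ne_eq, List.drop_eq_nil_iff]
  omega

lemma piece_tail {s : List Char} (hs : s ∈ pvPieceSrc) {m : Nat} (hm : m < s.length)
    {c : Char} {u' : List Char} (he : s.drop m = c :: u') (hne : u' ≠ []) : pvPiece u' := by
  have hd1 : s.drop (m + 1) = u' := by
    rw [← List.tail_drop, he]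
    rfl
  refine ⟨s, hs, m + 1, ?_, hd1.symm⟩
  by_contra hcon
  have hle : s.length ≤ m + 1 := Nat.le_of_not_lt hcon
  have hd0 : s.drop (m + 1) = [] := List.drop_eq_nil_iff.mpr hle
  exact hne (hd1.symm.trans hd0)

lemma nocreate_rep (b : List Char × List Char) (hb : b ∈ pvToks) :
    ∀ (n : Nat) (l : List Char), l.length ≤ n → ∀ (u : List Char), pvPiece u →
      u <+: repL b.1 b.2 l → u <+: l := by
  intro n
  induction n with
  | zero =>
    intro l hl u hu h
    have hnil : l = [] := List.eq_nil_of_length_eq_zero (Nat.le_zero.mp hl)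
    subst hnil
    rw [repL_nil] at h
    exact absurd (List.prefix_nil.mp h) (piece_ne_nil hu)
  | succ n ih =>
    intro l hl u hu h
    cases l with
    | nil =>
      rw [repL_nil] at h
      exact absurd (List.prefix_nil.mp h) (piece_ne_nil hu)
    | cons c cs =>
      by_cases hp : b.1 <+: (c :: cs)
      · rw [repL_pos _ _ _ (f_tok_ne_nil b hb) hp] at h
        exact absurd h (piece_not_prefix_repl hu b hb _)
      · rw [repL_neg _ _ _ _ hp] at h
        cases u with
        | nil => exact List.nil_prefix
        | cons x u' =>
          obtain ⟨rfl, h'⟩ := List.cons_prefix_cons.mp h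
          by_cases hu' : u' = []
          · subst hu'
            exact List.cons_prefix_cons.mpr ⟨rfl, List.nil_prefix⟩
          · obtain ⟨s, hs, m, hm, he⟩ := hu
            have hpu' : pvPiece u' := piece_tail hs hm he.symm hu'
            have hcs : cs.length ≤ n := by
              simp only [List.length_cons] at hl; omega
            exact List.cons_prefix_cons.mpr ⟨rfl, ih cs hcs u' hpu' h'⟩

lemma nocreate_rep' (b : List Char × List Char) (hb : b ∈ pvToks) (l u : List Char)
    (hu : pvPiece u) (h : u <+: repL b.1 b.2 l) : u <+: l :=
  nocreate_rep b hb l.length l le_rfl u hu h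

lemma token_drop1_piece {p : List Char × List Char} (hp : p ∈ pvToks) : pvPiece (p.1.drop 1) := by
  refine ⟨p.1, List.mem_append_left _ (List.mem_map_of_mem hp), 1, ?_, rfl⟩
  have := f_tok_len p hp; omega

lemma probe1_piece : pvPiece pvProbe1 :=
  ⟨pvProbe1, by simp [pvPieceSrc], 0, by decide, by simp⟩
lemma probe2_piece : pvPiece pvProbe2 :=
  ⟨pvProbe2, by simp [pvPieceSrc], 0, by decide, by simp⟩

-- ===== a replacement pass walks over inert text =====

lemma repL_pass (t r : List Char) : ∀ (a x : List Char),
    (∀ p, p < a.length → ¬ t <+: (a.drop p ++ x)) → repL t r (a ++ x) = a ++ repL t r x := by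
  intro a
  induction a with
  | nil => intro x _; simp
  | cons c a' ih =>
    intro x h
    have h0 : ¬ t <+: (c :: (a' ++ x)) := by simpa using h 0 (by simp)
    rw [List.cons_append, repL_neg _ _ _ _ h0,
      ih x (fun p hp => by simpa using h (p + 1) (by simpa using hp))]
    rfl

-- ===== the three phase lemmas =====

lemma chainR_nil : ∀ ts, chainR ts [] = [] := by
  intro ts
  induction ts with
  | nil => rfl
  | cons e ts ih => simpa [chainR, List.foldl_cons, repL_nil] using ih

lemma SL1 : ∀ (ts : List (List Char × List Char)), (∀ p ∈ ts, p ∈ pvToks) →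
    ∀ (c : Char) (l' : List Char), (∀ p ∈ ts, ¬ p.1 <+: (c :: l')) →
    chainR ts (c :: l') = c :: chainR ts l' := by
  intro ts
  induction ts with
  | nil => intro _ c l' _; rfl
  | cons e ts ih =>
    intro hsub c l' h
    have he : e ∈ pvToks := hsub e List.mem_cons_self
    have h1 : repL e.1 e.2 (c :: l') = c :: repL e.1 e.2 l' :=
      repL_neg _ _ _ _ (h e List.mem_cons_self)
    show chainR ts (repL e.1 e.2 (c :: l')) = c :: chainR ts (repL e.1 e.2 l')
    rw [h1]
    refine ih (fun p hp => hsub p (List.mem_cons_of_mem e hp)) c _ ?_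
    intro p hp hpre
    have hpmem : p ∈ pvToks := hsub p (List.mem_cons_of_mem e hp)
    have hne := f_tok_ne_nil p hpmem
    cases hx : p.1 with
    | nil => exact hne hx
    | cons y ys =>
      rw [hx] at hpre
      obtain ⟨rfl, h'⟩ := List.cons_prefix_cons.mp hpre
      have hys : ys = p.1.drop 1 := by rw [hx]; rfl
      have hpiece : pvPiece ys := by rw [hys]; exact token_drop1_piece hpmem
      have hh := nocreate_rep' e he l' ys hpiece h'
      exact h p (List.mem_cons_of_mem e hp)
        (by rw [hx]; exact List.cons_prefix_cons.mpr ⟨rfl, hh⟩)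

lemma SL2 (tk rk : List Char) (hk : (tk, rk) ∈ pvToks) :
    ∀ (ts : List (List Char × List Char)), (∀ p ∈ ts, p ∈ pvToks ∧ p.1 ≠ tk) →
    ∀ (cur : List Char), ¬ (pvProbe1 <+: cur) → ¬ (pvProbe2 <+: cur) →
    chainR ts (tk ++ cur) = tk ++ chainR ts cur := by
  intro ts
  induction ts with
  | nil => intro _ cur _ _; rfl
  | cons e ts ih =>
    intro hsub cur hc1 hc2
    obtain ⟨he, hne⟩ := hsub e List.mem_cons_self
    have htk3 : 3 ≤ tk.length := f_tok_len (tk, rk) hk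
    have hel : 3 ≤ e.1.length := f_tok_len e he
    have hstep : repL e.1 e.2 (tk ++ cur) = tk ++ repL e.1 e.2 cur := by
      apply repL_pass
      intro p hp hpre
      by_cases hp0 : p = 0
      · subst hp0
        simp only [List.drop_zero] at hpre
        rcases f0 (tk, rk) hk e he with heq | ⟨hn1, hn2⟩
        · exact hne ((show tk = e.1 from heq).symm)
        · exact incompat_no_prefix (show ¬ tk <+: e.1 from hn1) (show ¬ e.1 <+: tk from hn2) hpre
      · rcases f3 (tk, rk) hk e he p (by omega) (show p < tk.length from hp) with hlen | ⟨hn1, hn2⟩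
        · have hlen2 : tk.length - p ≤ 2 := hlen
          have hdl : (tk.drop p).length = tk.length - p := by simp
          have hdrop_pre : tk.drop p <+: e.1 :=
            List.prefix_of_prefix_length_le (List.prefix_append _ _) hpre (by omega)
          obtain ⟨t', he'⟩ := hdrop_pre
          have hpre' : tk.drop p ++ t' <+: tk.drop p ++ cur := by rw [he']; exact hpre
          have hcur : t' <+: cur := (List.prefix_append_right_inj _).mp hpre'
          rcases Nat.lt_or_ge (tk.length - p) 2 with h1 | h1
          · have hp1 : p = tk.length - 1 := by omega
            have hdd : tk.drop p = ['_'] := by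
              rw [hp1]; exact f_drop_len1 (tk, rk) hk
            have ht1 : e.1.drop 1 = t' := by rw [← he', hdd]; simp
            exact hc2 ((ht1 ▸ f_tok_drop1 e he).trans hcur)
          · have hp2 : p = tk.length - 2 := by omega
            have hdd : tk.drop p = ['_', '_'] := by
              rw [hp2]; exact f_drop_len2 (tk, rk) hk
            have ht1 : e.1.drop 2 = t' := by rw [← he', hdd]; simp
            exact hc1 ((ht1 ▸ f_tok_drop2 e he).trans hcur)
        · exact incompat_no_prefix
            (not_prefix_of_take 3 (show ¬ ((tk.drop p).take 3 <+: e.1.take 3) from hn1))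
            (not_prefix_of_take 3 (show ¬ (e.1.take 3 <+: (tk.drop p).take 3) from hn2)) hpre
    show chainR ts (repL e.1 e.2 (tk ++ cur)) = tk ++ chainR ts (repL e.1 e.2 cur)
    rw [hstep]
    refine ih (fun p hp => hsub p (List.mem_cons_of_mem e hp)) (repL e.1 e.2 cur) ?_ ?_
    · intro h; exact hc1 (nocreate_rep' e he cur pvProbe1 probe1_piece h)
    · intro h; exact hc2 (nocreate_rep' e he cur pvProbe2 probe2_piece h)

lemma SL3 (rk : List Char) (hrk : ∀ c ∈ rk, c ≠ '_') :
    ∀ (ts : List (List Char × List Char)), (∀ p ∈ ts, p ∈ pvToks) →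
    ∀ (cur : List Char), chainR ts (rk ++ cur) = rk ++ chainR ts cur := by
  intro ts
  induction ts with
  | nil => intro _ cur; rfl
  | cons e ts ih =>
    intro hsub cur
    have he : e ∈ pvToks := hsub e List.mem_cons_self
    have hstep : repL e.1 e.2 (rk ++ cur) = rk ++ repL e.1 e.2 cur := by
      apply repL_pass
      intro p hp hpre
      obtain ⟨ts0, hts0⟩ := f_tok_head e he
      cases hd : rk.drop p with
      | nil =>
        have := congrArg List.length hd
        simp only [List.length_drop, List.length_nil] at this
        omega
      | cons y ys =>
        rw [hd] at hpre
        have hy : y ∈ rk := by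
          have hmem : y ∈ rk.drop p := by rw [hd]; exact List.mem_cons_self
          exact List.drop_subset _ _ hmem
        rw [← hts0] at hpre
        simp only [List.cons_append, List.nil_append] at hpre
        have hyx : '_' = y := (List.cons_prefix_cons.mp hpre).1
        exact hrk y hy hyx.symm
    show chainR ts (repL e.1 e.2 (rk ++ cur)) = rk ++ chainR ts (repL e.1 e.2 cur)
    rw [hstep]
    exact ih (fun p hp => hsub p (List.mem_cons_of_mem e hp)) _

-- ===== the main equivalence on char lists =====

def pvOk (l : List Char) : Prop :=
  ¬ ("_pat__placeholder_".toList <:+: l) ∧ ¬ ("_pat___placeholder_".toList <:+: l)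

lemma ok_mono {l l' : List Char} (h : l' <:+: l) (hok : pvOk l) : pvOk l' :=
  ⟨fun hc => hok.1 (hc.trans h), fun hc => hok.2 (hc.trans h)⟩

lemma main_eq : ∀ (n : Nat) (l : List Char), l.length ≤ n → pvOk l →
    chainR pvToks l = pvScan l := by
  intro n
  induction n with
  | zero =>
    intro l hl _
    have hnil : l = [] := List.eq_nil_of_length_eq_zero (Nat.le_zero.mp hl)
    subst hnil
    rw [chainR_nil, pvScan_nil]
  | succ n ih =>
    intro l hl hok
    cases hf : pvToks.find? (fun p => p.1.isPrefixOf l) with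
    | none =>
      have hnone : ∀ p ∈ pvToks, ¬ p.1 <+: l := by
        intro p hp hpre
        have hh := List.find?_eq_none.mp hf p hp
        simp only [List.isPrefixOf_iff_prefix, Bool.not_eq_true, decide_eq_false_iff_not] at hh
        exact hh hpre
      cases l with
      | nil => rw [chainR_nil, pvScan_nil]
      | cons c cs =>
        have h1 : chainR pvToks (c :: cs) = c :: chainR pvToks cs :=
          SL1 pvToks (fun p hp => hp) c cs hnone
        have hcs : cs.length ≤ n := by simp only [List.length_cons] at hl; omega
        rw [h1, ih cs hcs (ok_mono (List.infix_cons (List.infix_refl cs)) hok)]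
        rw [pvScan_none_cons hf]
    | some p =>
      obtain ⟨tk, rk⟩ := p
      obtain ⟨hpred, as, bs, hsplit, hprior⟩ := List.find?_eq_some_iff_append.mp hf
      have hpre : tk <+: l := by
        simpa [List.isPrefixOf_iff_prefix] using hpred
      have hmem : (tk, rk) ∈ pvToks := List.mem_of_find?_eq_some hf
      have hpre2 := hpre
      obtain ⟨rest, hrest⟩ := hpre2
      have hdrop : l.drop tk.length = rest := by rw [← hrest]; simp
      -- rest cannot start with (_)placeholder_ : that is exactly what Pre_/pvOk forbids
      have hbad1 : ("_pat__placeholder_".toList : List Char) = "_pat__".toList ++ pvProbe1 := by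
        decide
      have hbad2 : ("_pat___placeholder_".toList : List Char) = "_pat__".toList ++ pvProbe2 := by
        decide
      set y := tk.take (tk.length - 6) with hy0
      have hy : tk = y ++ "_pat__".toList := by
        rw [hy0]; exact f_tok_suffix (tk, rk) hmem
      have hc1 : ¬ (pvProbe1 <+: rest) := by
        rintro ⟨z, hz⟩
        apply hok.1
        refine ⟨y, z, ?_⟩
        rw [hbad1, ← hrest, ← hz, hy]
        simp [List.append_assoc]
      have hc2 : ¬ (pvProbe2 <+: rest) := by
        rintro ⟨z, hz⟩
        apply hok.2
        refine ⟨y, z, ?_⟩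
        rw [hbad2, ← hrest, ← hz, hy]
        simp [List.append_assoc]
      have hsubas : ∀ q ∈ as, q ∈ pvToks ∧ q.1 ≠ tk := by
        intro q hq
        refine ⟨by rw [hsplit]; exact List.mem_append_left _ hq, ?_⟩
        intro hqe
        have hh := hprior q hq
        rw [hqe] at hh
        rw [List.isPrefixOf_iff_prefix.mpr hpre] at hh
        simp at hh
      have hsubbs : ∀ q ∈ bs, q ∈ pvToks := by
        intro q hq; rw [hsplit]
        exact List.mem_append_right _ (List.mem_cons_of_mem _ hq)
      have hchain : chainR pvToks l = rk ++ chainR pvToks rest := by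
        rw [hsplit]
        show chainR (as ++ (tk, rk) :: bs) l = rk ++ chainR (as ++ (tk, rk) :: bs) rest
        unfold chainR
        rw [List.foldl_append, List.foldl_cons, List.foldl_append, List.foldl_cons]
        show chainR bs (repL tk rk (chainR as l)) = rk ++ chainR bs (repL tk rk (chainR as rest))
        rw [← hrest, SL2 tk rk hmem as hsubas rest hc1 hc2,
          repL_pos tk rk _ (f_tok_ne_nil _ hmem) (List.prefix_append _ _), List.drop_left,
          SL3 rk (fun c hc => f_repl_no_us (tk, rk) hmem c hc) bs hsubbs]
      have hlt : rest.length ≤ n := by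
        have h0 : 0 < tk.length := List.length_pos_of_ne_nil (f_tok_ne_nil _ hmem)
        have := congrArg List.length hrest
        simp only [List.length_append] at this
        omega
      have hokr : pvOk rest := ok_mono ⟨tk, [], by rw [← hrest]; simp⟩ hok
      rw [hchain, ih rest hlt hokr, pvScan_some hf]
      show rk ++ pvScan rest = rk ++ pvScan (l.drop tk.length)
      rw [hdrop]

-- ===== bridging the string-level port A to the char-list functions =====

def chainL (ts : List (List Char × List Char)) (l : List Char) : List Char :=
  ts.foldl (fun s p => PySem.Chars.replace s p.1 p.2) l

lemma chainL_eq_chainR : ∀ (ts : List (List Char × List Char)), (∀ p ∈ ts, p.1 ≠ []) →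
    ∀ l, chainL ts l = chainR ts l := by
  intro ts
  induction ts with
  | nil => intro _ l; rfl
  | cons e ts ih =>
    intro h l
    show chainL ts (PySem.Chars.replace l e.1 e.2) = chainR ts (repL e.1 e.2 l)
    rw [replace_eq_repL _ _ _ (h e List.mem_cons_self)]
    exact ih (fun p hp => h p (List.mem_cons_of_mem e hp)) _

lemma foldA_toList : ∀ (ts : List (String × String)) (s : String),
    (ts.foldl (fun l kv => PySem.Str.replace l ("__placeholder_" ++ kv.1 ++ "_pat__") kv.2) s).toList
      = chainL (ts.map (fun kv => (("__placeholder_" ++ kv.1 ++ "_pat__").toList, kv.2.toList))) s.toList := by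
  intro ts
  induction ts with
  | nil => intro s; rfl
  | cons e ts ih =>
    intro s
    rw [List.foldl_cons, List.map_cons, ih]
    show chainL _ (PySem.Str.replace s _ _).toList = chainL _ (PySem.Chars.replace s.toList _ _)
    rw [PySem.Str.toList_replace]

-- ===== VERDICT =====
theorem replace_posix_char_class_spec : Claim_equal_replace_posix_char_class := by
  intro line _hdom hpre
  show replace_posix_char_class line = replace_posix_char_class_alt line
  have h1 : (replace_posix_char_class line).toList = pvScan line.toList := by
    have h0 : (replace_posix_char_class line).toList = chainL pvToks line.toList := by
      have := foldA_toList pvTbl line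
      rw [pvToks_eq] at this
      exact this
    rw [h0, chainL_eq_chainR pvToks f_tok_ne_nil,
      main_eq line.toList.length line.toList le_rfl ⟨hpre.1, hpre.2⟩]
  calc replace_posix_char_class line
      = String.ofList (replace_posix_char_class line).toList := String.ofList_toList.symm
    _ = String.ofList (pvScan line.toList) := by rw [h1]
    _ = replace_posix_char_class_alt line := rfl
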